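-- pv_equiv track=rewrite | github.com/farhanmunim/london-buses | Reference app/Original Project_RouteMapster/scripts/build_frequency_cache.py | normalize_times
-- ===== SOURCE A (Python) =====
-- from typing import Any, Dict, Iterable, List, Optional, Sequence, Set, Tuple
--
-- def normalize_times(times: Iterable[int]) -> List[int]:
--     normalized: List[int] = []
--     for value in times:
--         try:
--             minutes = int(round(value))
--         except (TypeError, ValueError):
--             continue
--         if minutes < 0:
--             continue
--         minutes = minutes % (24 * 60)
--         normalized.append(minutes)
--     return sorted(set(normalized))
-- ===== SOURCE B (Python) =====
-- def normalize_times(times):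
--     seen = [False] * 1440
--     for value in times:
--         try:
--             minutes = int(round(value))
--         except (TypeError, ValueError):
--             continue
--         if minutes < 0:
--             continue
--         seen[minutes % 1440] = True
--     result = []
--     for m in range(1440):
--         if seen[m]:
--             result.append(m)
--     return result
-- ===== Notes on version B (the rewrite author's own statement) =====
-- stated objective: alternative
-- what changed: Replaces collect-then-sorted(set(...)) by a fixed 1440-slot boolean table marked during the pass and a single ascending range walk that emits each marked minute (counting-sort style), eliminating the comparison sort and the set.
import Mathlib
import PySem

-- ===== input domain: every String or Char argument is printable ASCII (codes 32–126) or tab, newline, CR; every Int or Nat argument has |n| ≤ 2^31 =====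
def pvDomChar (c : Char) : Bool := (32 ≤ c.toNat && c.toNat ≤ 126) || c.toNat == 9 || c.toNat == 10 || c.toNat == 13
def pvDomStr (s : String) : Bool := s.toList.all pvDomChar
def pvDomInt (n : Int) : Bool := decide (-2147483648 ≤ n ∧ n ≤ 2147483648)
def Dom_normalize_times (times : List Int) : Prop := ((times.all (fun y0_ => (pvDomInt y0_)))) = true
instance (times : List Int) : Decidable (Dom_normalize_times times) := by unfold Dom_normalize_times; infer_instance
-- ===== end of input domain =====

-- B replaces collect-then-sorted(set(...)) by a 1440-slot boolean table and an ascending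
-- range walk emitting the marked minutes (counting-sort style); objective: alternative.

-- ===== PORT A =====
def normalize_times (times : List Int) : List Int :=
  let normalized : List Int := times.foldl (fun normalized value =>
    -- int(round(value)) on an int IS that int; the except branch is unreachable for ints
    let minutes := value
    if minutes < 0 then normalized
    else normalized ++ [PySem.Int.mod minutes (24 * 60)]) []
  PySem.List.sorted (PySem.Set.ofList normalized) (fun x => x) false

-- ===== PORT B =====
def normalize_times_alt (times : List Int) : List Int :=
  let seen : List Bool := times.foldl (fun seen value =>
    -- int(round(value)) on an int IS that int; the except branch is unreachable for ints
    let minutes := value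
    if minutes < 0 then seen
    else PySem.List.pySetD seen (PySem.Int.mod minutes 1440) true) (List.replicate 1440 false)
  (PySem.List.pyRange 0 1440 1).foldl (fun result m =>
    if PySem.List.pyGetD seen m false then result ++ [m] else result) []

-- ===== PRECONDITION & SPEC =====
def Spec_normalize_times (times : List Int) (out : List Int) : Prop := out = normalize_times_alt times
instance (times : List Int) (out : List Int) : Decidable (Spec_normalize_times times out) := by unfold Spec_normalize_times; infer_instance

-- ===== CLAIM (what is proved, stated in full; the proofs are below) =====
def Claim_equal_normalize_times : Prop := ∀ (times : List Int), Dom_normalize_times times → Spec_normalize_times times (normalize_times times)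

-- ===== LEMMAS AND PROOFS =====

-- A's accumulation loop is filter-then-map.
theorem pvA_fold (ts : List Int) (acc : List Int) :
    ts.foldl (fun acc v => if v < 0 then acc else acc ++ [PySem.Int.mod v 1440]) acc
      = acc ++ (ts.filter (fun v => !decide (v < 0))).map (fun v => PySem.Int.mod v 1440) := by
  induction ts generalizing acc with
  | nil => simp
  | cons h t ih =>
    rw [List.foldl_cons]
    by_cases hv : h < 0
    · rw [if_pos hv, ih, List.filter_cons_of_neg (by simpa using hv)]
    · rw [if_neg hv, ih, List.filter_cons_of_pos (by simpa using hv)]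
      simp

-- B's emission loop is a filter of the range.
theorem pvB_fold (seen : List Bool) (l : List Int) (acc : List Int) :
    l.foldl (fun result m => if PySem.List.pyGetD seen m false then result ++ [m] else result) acc
      = acc ++ l.filter (fun m => PySem.List.pyGetD seen m false) := by
  induction l generalizing acc with
  | nil => simp
  | cons h t ih =>
    rw [List.foldl_cons]
    by_cases hm : PySem.List.pyGetD seen h false
    · rw [if_pos hm, ih]
      simp [hm]
    · rw [if_neg hm, ih]
      simp [hm]

-- invariant of B's marking loop
theorem pvSeen_inv (ts : List Int) (seen : List Bool) (hlen : seen.length = 1440) :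
    (ts.foldl (fun seen v => if v < 0 then seen
        else PySem.List.pySetD seen (PySem.Int.mod v 1440) true) seen).length = 1440 ∧
    ∀ (m : Int), 0 ≤ m → m < 1440 →
      (PySem.List.pyGetD (ts.foldl (fun seen v => if v < 0 then seen
          else PySem.List.pySetD seen (PySem.Int.mod v 1440) true) seen) m false = true ↔
        (PySem.List.pyGetD seen m false = true ∨
          ∃ v ∈ ts, ¬ v < 0 ∧ PySem.Int.mod v 1440 = m)) := by
  induction ts generalizing seen with
  | nil => exact ⟨hlen, fun m _ _ => by simp⟩
  | cons h t ih =>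
    by_cases hv : h < 0
    · have hrec := ih seen hlen
      refine ⟨by rw [List.foldl_cons, if_pos hv]; exact hrec.1, fun m h0 h1 => ?_⟩
      rw [List.foldl_cons, if_pos hv, hrec.2 m h0 h1]
      constructor
      · rintro (hs | ⟨v, hvmem, hvp⟩)
        · exact Or.inl hs
        · exact Or.inr ⟨v, List.mem_cons_of_mem _ hvmem, hvp⟩
      · rintro (hs | ⟨v, hvmem, hvp⟩)
        · exact Or.inl hs
        · rcases List.mem_cons.mp hvmem with rfl | hvt
          · exact absurd hv hvp.1
          · exact Or.inr ⟨v, hvt, hvp⟩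
    · have hmod0 : 0 ≤ PySem.Int.mod h 1440 := PySem.Int.mod_nonneg h (by norm_num)
      have hmodlt : PySem.Int.mod h 1440 < 1440 := PySem.Int.mod_lt h (by norm_num)
      have hset : (PySem.List.pySetD seen (PySem.Int.mod h 1440) true)
          = seen.set (PySem.Int.mod h 1440).toNat true :=
        PySem.List.pySetD_of_nonneg seen true hmod0
      have hlen' : (PySem.List.pySetD seen (PySem.Int.mod h 1440) true).length = 1440 := by
        rw [hset]; simpa using hlen
      have hrec := ih _ hlen'
      refine ⟨by rw [List.foldl_cons, if_neg hv]; exact hrec.1, fun m h0 h1 => ?_⟩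
      rw [List.foldl_cons, if_neg hv, hrec.2 m h0 h1]
      have hmlt : m.toNat < seen.length := by omega
      have hget : PySem.List.pyGetD (PySem.List.pySetD seen (PySem.Int.mod h 1440) true) m false
          = (seen.set (PySem.Int.mod h 1440).toNat true)[m.toNat]'(by simpa using hmlt) := by
        rw [hset, PySem.List.pyGetD_eq_getElem _ _ h0 (by rw [List.length_set]; omega)]
      have hgetseen : PySem.List.pyGetD seen m false = seen[m.toNat]'hmlt :=
        PySem.List.pyGetD_eq_getElem _ _ h0 (by omega)
      rw [hget, hgetseen, List.getElem_set]
      by_cases heq : (PySem.Int.mod h 1440).toNat = m.toNat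
      · have hem : PySem.Int.mod h 1440 = m := by omega
        rw [if_pos heq]
        constructor
        · intro _; exact Or.inr ⟨h, List.mem_cons_self, hv, hem⟩
        · intro _; exact Or.inl rfl
      · rw [if_neg heq]
        constructor
        · rintro (hs | ⟨v, hvmem, hvp⟩)
          · exact Or.inl hs
          · exact Or.inr ⟨v, List.mem_cons_of_mem _ hvmem, hvp⟩
        · rintro (hs | ⟨v, hvmem, hvp⟩)
          · exact Or.inl hs
          · rcases List.mem_cons.mp hvmem with rfl | hvt
            · obtain ⟨_, hv2⟩ := hvp
              exact absurd (by omega : (PySem.Int.mod v 1440).toNat = m.toNat) heq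
            · exact Or.inr ⟨v, hvt, hvp⟩

-- the initial table reads false everywhere in range
theorem pvReplicate_getD (m : Int) (h0 : 0 ≤ m) (h1 : m < 1440) :
    PySem.List.pyGetD (List.replicate 1440 false) m false = false := by
  rw [PySem.List.pyGetD_eq_getElem _ _ h0 (by rw [List.length_replicate]; omega), List.getElem_replicate]

-- ===== VERDICT (by name: the statement is the Claim_ definition above) =====
theorem normalize_times_spec : Claim_equal_normalize_times := by
  intro times _
  show normalize_times times = normalize_times_alt times
  show PySem.List.sorted (PySem.Set.ofList (times.foldl
        (fun acc v => if v < 0 then acc else acc ++ [PySem.Int.mod v (24 * 60)]) []))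
        (fun x => x) false
      = (PySem.List.pyRange 0 1440 1).foldl (fun result m =>
          if PySem.List.pyGetD (times.foldl
              (fun s v => if v < 0 then s else PySem.List.pySetD s (PySem.Int.mod v 1440) true)
              (List.replicate 1440 false)) m false
          then result ++ [m] else result) []
  simp only [show ((24 : Int) * 60) = 1440 from by norm_num]
  rw [pvA_fold, pvB_fold]
  simp only [List.nil_append]
  have hinv := pvSeen_inv times (List.replicate 1440 false) (by rw [List.length_replicate])
  refine PySem.List.sorted_eq_of_perm_of_pairwise_lt _ _ _ ?_ ?_
  · -- the filtered range is a permutation of set(normalized)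
    rw [List.perm_ext_iff_of_nodup ((PySem.List.nodup_pyRange_one 0 1440).filter _)
      (PySem.Set.nodup_ofList _)]
    intro x
    rw [List.mem_filter, PySem.List.mem_pyRange_one, PySem.Set.mem_ofList]
    simp only [List.mem_map, List.mem_filter, Bool.not_eq_eq_eq_not, Bool.not_true,
      decide_eq_false_iff_not]
    constructor
    · rintro ⟨⟨h0, h1⟩, hg⟩
      rcases (hinv.2 x h0 h1).mp hg with hs | ⟨v, hvmem, hvneg, hvm⟩
      · rw [pvReplicate_getD x h0 h1] at hs
        exact absurd hs (by decide)
      · exact ⟨v, ⟨hvmem, hvneg⟩, hvm⟩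
    · rintro ⟨v, ⟨hvmem, hvneg⟩, hvm⟩
      have h0 : 0 ≤ x := hvm ▸ PySem.Int.mod_nonneg v (by norm_num)
      have h1 : x < 1440 := hvm ▸ PySem.Int.mod_lt v (by norm_num)
      exact ⟨⟨h0, h1⟩, (hinv.2 x h0 h1).mpr (Or.inr ⟨v, hvmem, hvneg, hvm⟩)⟩
  · -- the filtered range is strictly increasing
    exact List.Pairwise.sublist List.filter_sublist (PySem.List.pairwise_lt_pyRange_one 0 1440)
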